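-- pv_equiv track=rewrite | github.com/lukehowlett97/residual_modelling_dashboard | preprocessing/segmentation.py | _get_unstable_periods
-- ===== SOURCE A (Python) =====
-- from typing import List, Dict, Optional
--
-- def _get_unstable_periods(
--
--     stable_periods: List[Dict[str, int]],
--     data_length: int
-- ) -> List[Dict[str, int]]:
--     """
--     Identify unstable periods between stable periods.
--
--     Parameters:
--         stable_periods (List[Dict[str, int]]): A list of stable periods with 'start' and 'end' indices.
--         data_length (int): The total number of data points in the dataset.
--
--     Returns:
--         List[Dict[str, int]]: A list of dictionaries with 'start' and 'end' keys representing unstable periods.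
--     """
--     unstable_periods = []
--     if not stable_periods:
--         if data_length > 0:
--             unstable_periods.append({'start': 0, 'end': data_length - 1})
--         return unstable_periods
--
--     # Sort stable_periods by start index to ensure correct order
--     sorted_stable = sorted(stable_periods, key=lambda x: x['start'])
--
--     prev_end = -1
--
--     for period in sorted_stable:
--         current_start = period['start']
--         current_end = period['end']
--
--         # Check for gap between previous end and current start
--         if current_start > prev_end + 1:
--             unstable_start = prev_end + 1
--             unstable_end = current_start - 1
--             unstable_periods.append({
--                 'start': unstable_start,
--                 'end': unstable_end
--             })
--
--         prev_end = current_end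
--
--     # Check for any unstable period after the last stable period
--     if prev_end < data_length - 1:
--         unstable_start = prev_end + 1
--         unstable_end = data_length - 1
--         unstable_periods.append({
--             'start': unstable_start,
--             'end': unstable_end
--         })
--
--     return unstable_periods
-- ===== SOURCE B (Python) =====
-- def _get_unstable_periods(stable_periods, data_length):
--     srt = sorted(stable_periods, key=lambda x: x['start'])
--     # one flat boundary array: [-1, s0, e0, s1, e1, ..., data_length]
--     flat = [-1] + [v for p in srt for v in (p['start'], p['end'])] + [data_length]
--     out = []
--     # disjoint index pairs (flat[i], flat[i+1]) are exactly (prev boundary, next boundary)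
--     for i in range(0, len(flat), 2):
--         lo, hi = flat[i], flat[i + 1]
--         if hi - lo > 1:
--             out.append({'start': lo + 1, 'end': hi - 1})
--     return out
-- ===== Notes on version B (the rewrite author's own statement) =====
-- stated objective: alternative
-- what changed: Replaces the stateful prev_end loop with its empty-input and trailing-gap special cases by a staged algorithm: flatten the sorted periods into one flat boundary array [-1, s0, e0, ..., data_length], then scan its disjoint index pairs, emitting a gap per pair more than 1 apart.
import Mathlib
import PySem

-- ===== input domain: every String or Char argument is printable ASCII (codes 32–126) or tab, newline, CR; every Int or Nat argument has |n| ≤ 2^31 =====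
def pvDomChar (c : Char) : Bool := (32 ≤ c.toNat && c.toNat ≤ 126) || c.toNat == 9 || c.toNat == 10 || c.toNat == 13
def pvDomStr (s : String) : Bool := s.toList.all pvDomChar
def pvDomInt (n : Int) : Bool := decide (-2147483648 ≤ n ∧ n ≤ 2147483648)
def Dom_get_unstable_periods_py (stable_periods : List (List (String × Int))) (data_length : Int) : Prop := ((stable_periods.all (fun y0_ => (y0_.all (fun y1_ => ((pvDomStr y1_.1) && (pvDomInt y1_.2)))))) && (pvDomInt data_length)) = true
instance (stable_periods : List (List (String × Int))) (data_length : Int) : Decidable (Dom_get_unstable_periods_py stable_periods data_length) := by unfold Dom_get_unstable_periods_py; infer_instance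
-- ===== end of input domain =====

-- B is a staged boundary-array algorithm: flatten the sorted periods into one
-- flat boundary list [-1, s0, e0, ..., data_length] and scan its disjoint index
-- pairs for gaps (objective: alternative); equal on all inputs whose periods
-- carry 'start' and 'end' keys (Pre_ excludes KeyError inputs).


-- dict lookup p[k]; total form, exact under Pre_ (keys present)
def pvGetKey : List (String × Int) → String → Int
  | [], _ => 0
  | (k, v) :: t, s => if k == s then v else pvGetKey t s

-- ===== PORT A =====
def get_unstable_periods_py (stable_periods : List (List (String × Int))) (data_length : Int) : List (List (String × Int)) :=
  if stable_periods = [] then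
    (if data_length > 0 then [[("start", 0), ("end", data_length - 1)]] else [])
  else
    let sorted_stable := PySem.List.sorted stable_periods (fun x => pvGetKey x "start")
    let st := sorted_stable.foldl (fun (st : List (List (String × Int)) × Int) period =>
      let current_start := pvGetKey period "start"
      let current_end := pvGetKey period "end"
      let ups := if current_start > st.2 + 1 then
          st.1 ++ [[("start", st.2 + 1), ("end", current_start - 1)]]
        else st.1
      (ups, current_end)) ([], -1)
    if st.2 < data_length - 1 then
      st.1 ++ [[("start", st.2 + 1), ("end", data_length - 1)]]
    else st.1

-- ===== PORT B =====
-- Source B's index loop 'for i in range(0, len(flat), 2): lo, hi = flat[i], flat[i+1]'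
-- visits exactly the disjoint leading pairs of flat; transcribed as the
-- structural recursion consuming two elements per step.
def pvGaps : List Int → List (List (String × Int))
  | lo :: hi :: rest =>
      (if hi - lo > 1 then [[("start", lo + 1), ("end", hi - 1)]] else []) ++ pvGaps rest
  | _ => []

def get_unstable_periods_py_alt (stable_periods : List (List (String × Int))) (data_length : Int) : List (List (String × Int)) :=
  let srt := PySem.List.sorted stable_periods (fun x => pvGetKey x "start")
  let flat := -1 :: (srt.flatMap (fun p => [pvGetKey p "start", pvGetKey p "end"]) ++ [data_length])
  pvGaps flat

-- ===== PRECONDITION & SPEC =====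
-- Pre_ excludes exactly the inputs where Python A raises KeyError: some period lacks a 'start' or 'end' key.
def Pre_get_unstable_periods_py (stable_periods : List (List (String × Int))) (data_length : Int) : Prop :=
  ∀ p ∈ stable_periods, (p.find? (fun kv => kv.1 == "start")).isSome ∧ (p.find? (fun kv => kv.1 == "end")).isSome
instance (stable_periods : List (List (String × Int))) (data_length : Int) : Decidable (Pre_get_unstable_periods_py stable_periods data_length) := by unfold Pre_get_unstable_periods_py; infer_instance
def pvWitness_get_unstable_periods_py : (List (List (String × Int))) × Int := ([[("start", 2), ("end", 3)]], 6)

def Spec_get_unstable_periods_py (stable_periods : List (List (String × Int))) (data_length : Int) (out : List (List (String × Int))) : Prop := out = get_unstable_periods_py_alt stable_periods data_length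
instance (stable_periods : List (List (String × Int))) (data_length : Int) (out : List (List (String × Int))) : Decidable (Spec_get_unstable_periods_py stable_periods data_length out) := by unfold Spec_get_unstable_periods_py; infer_instance

-- ===== CLAIM (what is proved, stated in full; the proofs are below) =====
def Claim_equal_get_unstable_periods_py : Prop := ∀ (stable_periods : List (List (String × Int))) (data_length : Int), Dom_get_unstable_periods_py stable_periods data_length → Pre_get_unstable_periods_py stable_periods data_length → Spec_get_unstable_periods_py stable_periods data_length (get_unstable_periods_py stable_periods data_length)

-- ===== LEMMAS AND PROOFS =====

-- A's loop body + trailing check equals B's pair scan of the boundary list,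
-- for any prev_end and accumulator.
theorem pv_loop_eq (l : List (List (String × Int))) (prev : Int)
    (acc : List (List (String × Int))) (dl : Int) :
    (let st := l.foldl (fun (st : List (List (String × Int)) × Int) period =>
        let cs := pvGetKey period "start"
        let ce := pvGetKey period "end"
        let ups := if cs > st.2 + 1 then
            st.1 ++ [[("start", st.2 + 1), ("end", cs - 1)]]
          else st.1
        (ups, ce)) (acc, prev)
     if st.2 < dl - 1 then st.1 ++ [[("start", st.2 + 1), ("end", dl - 1)]] else st.1)
    = acc ++ pvGaps (prev :: (l.flatMap (fun p => [pvGetKey p "start", pvGetKey p "end"]) ++ [dl])) := by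
  induction l generalizing prev acc with
  | nil =>
    simp only [List.foldl_nil, List.flatMap_nil, List.nil_append, pvGaps]
    split_ifs with h1 h2 h2 <;> simp <;> omega
  | cons p t ih =>
    simp only [List.foldl_cons, List.flatMap_cons, List.cons_append, List.append_assoc, pvGaps]
    rw [ih]
    by_cases h : pvGetKey p "start" > prev + 1
    · have h' : pvGetKey p "start" - prev > 1 := by omega
      simp [h, h', List.append_assoc]
    · have h' : ¬ (pvGetKey p "start" - prev > 1) := by omega
      simp [h, h']

theorem get_unstable_periods_py_eq (sp : List (List (String × Int))) (dl : Int) :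
    get_unstable_periods_py sp dl = get_unstable_periods_py_alt sp dl := by
  unfold get_unstable_periods_py get_unstable_periods_py_alt
  by_cases hsp : sp = []
  · subst hsp
    have hs : PySem.List.sorted ([] : List (List (String × Int))) (fun x => pvGetKey x "start") = [] := rfl
    simp only [hs, List.flatMap_nil, List.nil_append, pvGaps]
    split_ifs with h1 h2 h2 <;> first | omega | norm_num
  · rw [if_neg hsp]
    exact pv_loop_eq _ (-1) [] dl

-- ===== VERDICT (by name: the statement is the Claim_ definition above) =====
theorem get_unstable_periods_py_spec : Claim_equal_get_unstable_periods_py := by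
  intro sp dl _ _
  exact get_unstable_periods_py_eq sp dl
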